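-- pv_equiv track=rewrite | github.com/jingyanw/recruitment-uncertainty | simulation.py | vector_generator
-- ===== SOURCE A (Python) =====
-- def vector_generator(caps, tau):
-- 	# caps: [n_1, n_2, ...]
-- 	# tau: int
-- 	if tau == 0:
-- 		yield [0]*len(caps)
-- 	elif len(caps) == 1:
-- 		last_cap = min(caps[0], tau)
-- 		yield from ([i] for i in range(last_cap + 1))
-- 	else:
-- 		first_cap = min(caps[0], tau) # can't take more than tau in the first entry
-- 		remaining_caps = caps[1:]
-- 		for i in range(first_cap + 1):
-- 			for remaining_vec in vector_generator(remaining_caps, tau - i):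
-- 				yield [i] + remaining_vec
-- ===== SOURCE B (Python) =====
-- def vector_generator(caps, tau):
-- 	# Iterative depth-first enumeration with an explicit stack of
-- 	# (prefix, remaining budget, remaining caps) frames, instead of recursion.
-- 	stack = [([], tau, caps)]
-- 	while stack:
-- 		prefix, t, rest = stack.pop()
-- 		if t == 0:
-- 			yield prefix + [0] * len(rest)
-- 		elif not rest:
-- 			if t > 0:
-- 				yield prefix
-- 		else:
-- 			for i in range(min(rest[0], t), -1, -1):
-- 				stack.append((prefix + [i], t - i, rest[1:]))
-- ===== Notes on version B (the rewrite author's own statement) =====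
-- stated objective: alternative
-- what changed: Replaces A's recursive generator by an iterative depth-first loop over an explicit stack of (prefix, remaining budget, remaining caps) frames, carrying the prefix forward as an accumulator and using a unified empty-suffix base case instead of A's len(caps)==1 special case.
import Mathlib
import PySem

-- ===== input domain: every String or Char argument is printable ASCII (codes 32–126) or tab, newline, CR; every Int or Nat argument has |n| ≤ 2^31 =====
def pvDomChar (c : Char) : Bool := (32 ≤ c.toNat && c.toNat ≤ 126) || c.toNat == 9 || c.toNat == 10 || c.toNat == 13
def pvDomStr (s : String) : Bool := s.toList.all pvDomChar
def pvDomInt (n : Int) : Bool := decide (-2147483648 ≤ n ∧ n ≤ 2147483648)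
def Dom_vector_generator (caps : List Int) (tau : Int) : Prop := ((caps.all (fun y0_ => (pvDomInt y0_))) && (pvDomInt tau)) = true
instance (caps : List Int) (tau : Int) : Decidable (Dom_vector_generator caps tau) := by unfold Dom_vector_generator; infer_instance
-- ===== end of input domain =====

-- B replaces A's recursive generator by an iterative depth-first loop over an explicit
-- stack of (prefix, budget, remaining-caps) frames (alternative decomposition; not faster).

-- ===== PORT A =====
-- A is a generator; the ports return the list of yielded vectors.
def vector_generator (caps : List Int) (tau : Int) : List (List Int) :=
  if tau = 0 then [List.replicate caps.length 0]
  else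
    match caps with
    | [] => []  -- Python raises IndexError here (caps[0]); excluded by Pre_
    | [c] =>
      -- last_cap = min(caps[0], tau); yield [i] for i in range(last_cap + 1)
      (PySem.List.pyRange 0 (min c tau + 1) 1).map (fun i => [i])
    | c :: c2 :: rest =>
      -- first_cap = min(caps[0], tau); nested for-loops accumulate the yields in order
      (PySem.List.pyRange 0 (min c tau + 1) 1).foldl
        (fun acc i =>
          acc ++ (vector_generator (c2 :: rest) (tau - i)).map (fun v => i :: v)) []

-- ===== PORT B =====
-- Fuel for B's while-loop (a totality guard only): an upper bound on the number of
-- stack pops a frame with this remaining-caps list and budget can cause.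
def bCost (rest : List Int) (t : Int) : Nat :=
  match rest with
  | [] => 1
  | c :: rs => 1 + ((PySem.List.pyRange 0 (min c t + 1) 1).map (fun i => bCost rs (t - i))).sum

-- The while-loop. The Lean list's HEAD is the TOP of the Python stack (Python appends
-- and pops at the right end); the descending for-loop pushes children so that the
-- smallest i ends on top, exactly as in Source B.
def bLoop (fuel : Nat) (stack : List (List Int × Int × List Int)) (acc : List (List Int)) :
    List (List Int) :=
  match fuel, stack with
  | _, [] => acc
  | 0, _ :: _ => acc  -- fuel exhaustion only; bCost is proved sufficient below
  | fuel + 1, (pre, t, rest) :: stk =>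
    if t = 0 then bLoop fuel stk (acc ++ [pre ++ List.replicate rest.length 0])
    else
      match rest with
      | [] => bLoop fuel stk (acc ++ if 0 < t then [pre] else [])
      | c :: rs =>
        bLoop fuel
          ((PySem.List.pyRange (min c t) (-1) (-1)).foldl
            (fun st i => (pre ++ [i], t - i, rs) :: st) stk)
          acc

def vector_generator_alt (caps : List Int) (tau : Int) : List (List Int) :=
  bLoop (bCost caps tau) [([], tau, caps)] []

-- ===== PRECONDITION & SPEC =====
-- Pre_ excludes exactly empty caps with tau ≠ 0, where Python A raises IndexError (caps[0]).
def Pre_vector_generator (caps : List Int) (tau : Int) : Prop := caps = [] → tau = 0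
instance (caps : List Int) (tau : Int) : Decidable (Pre_vector_generator caps tau) := by
  unfold Pre_vector_generator; infer_instance
def pvWitness_vector_generator : List Int × Int := ([2, 1], 2)

def Spec_vector_generator (caps : List Int) (tau : Int) (out : List (List Int)) : Prop :=
  out = vector_generator_alt caps tau
instance (caps : List Int) (tau : Int) (out : List (List Int)) : Decidable (Spec_vector_generator caps tau out) := by
  unfold Spec_vector_generator; infer_instance

-- ===== CLAIM (what is proved, stated in full; the proofs are below) =====
def Claim_equal_vector_generator : Prop := ∀ (caps : List Int) (tau : Int), Dom_vector_generator caps tau → Pre_vector_generator caps tau → Spec_vector_generator caps tau (vector_generator caps tau)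

-- ===== LEMMAS AND PROOFS =====

-- What one stack frame (pre, t, rest) contributes, described recursively.
def gB (rest : List Int) (t : Int) : List (List Int) :=
  match rest with
  | [] => if 0 ≤ t then [[]] else []
  | c :: rs =>
    if t = 0 then [List.replicate (c :: rs).length 0]
    else (PySem.List.pyRange 0 (min c t + 1) 1).flatMap (fun i => (gB rs (t - i)).map (fun v => i :: v))

theorem gB_zero (rest : List Int) : gB rest 0 = [List.replicate rest.length 0] := by
  cases rest <;> simp [gB]

theorem one_le_bCost (rest : List Int) (t : Int) : 1 ≤ bCost rest t := by
  cases rest <;> simp [bCost]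

theorem foldr_cons_map {α β : Type} (l : List α) (mk : α → β) (stk : List β) :
    l.foldr (fun i st => mk i :: st) stk = l.map mk ++ stk := by
  induction l with
  | nil => rfl
  | cons x xs ih => simp [ih]

theorem push_desc {β : Type} (a : Int) (mk : Int → β) (stk : List β) :
    (PySem.List.pyRange a (-1) (-1)).foldl (fun st i => mk i :: st) stk
      = (PySem.List.pyRange 0 (a + 1) 1).map mk ++ stk := by
  rw [PySem.List.pyRange_neg_one_eq_reverse, List.foldl_reverse]
  rw [show (-1 : Int) + 1 = 0 by norm_num]
  exact foldr_cons_map _ _ _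

theorem flatMap_singleton_mem {α β : Type} (l : List α) (f : α → List β) (g : α → β)
    (h : ∀ x ∈ l, f x = [g x]) : l.flatMap f = l.map g := by
  induction l with
  | nil => rfl
  | cons x xs ih =>
    rw [List.flatMap_cons, List.map_cons, h x (List.mem_cons_self ..),
      ih (fun y hy => h y (List.mem_cons_of_mem _ hy))]
    rfl

-- the loop invariant: with enough fuel, draining the stack appends each frame's
-- contribution (gB, prefixed) in stack order
theorem bLoop_eq : ∀ (fuel : Nat) (stack : List (List Int × Int × List Int)) (acc : List (List Int)),
    (stack.map (fun f => bCost f.2.2 f.2.1)).sum ≤ fuel →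
    bLoop fuel stack acc
      = acc ++ (stack.map (fun f => (gB f.2.2 f.2.1).map (fun v => f.1 ++ v))).flatten := by
  intro fuel
  induction fuel with
  | zero =>
    intro stack acc h
    cases stack with
    | nil => simp [bLoop]
    | cons f stk =>
      exfalso
      have := one_le_bCost f.2.2 f.2.1
      simp only [List.map_cons, List.sum_cons, Nat.le_zero] at h
      omega
  | succ fuel ih =>
    intro stack acc h
    cases stack with
    | nil => simp [bLoop]
    | cons f stk =>
      obtain ⟨pre, t, rest⟩ := f
      simp only [List.map_cons, List.sum_cons] at h
      by_cases ht : t = 0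
      · subst ht
        rw [show bLoop (fuel + 1) ((pre, 0, rest) :: stk) acc
            = bLoop fuel stk (acc ++ [pre ++ List.replicate rest.length 0]) from rfl]
        rw [ih stk _ (by have := one_le_bCost rest 0; omega)]
        simp [gB_zero]
      · cases rest with
        | nil =>
          rw [show bLoop (fuel + 1) ((pre, t, []) :: stk) acc
              = bLoop fuel stk (acc ++ if 0 < t then [pre] else []) from by simp [bLoop, ht]]
          rw [ih stk _ (by have := one_le_bCost ([] : List Int) t; omega)]
          have : (gB [] t).map (fun v => pre ++ v) = if 0 < t then [pre] else [] := by
            simp only [gB]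
            split_ifs with h1 h2 h2 <;> simp <;> omega
          simp only [List.map_cons, List.flatten_cons, this, List.append_assoc]
        | cons c rs =>
          rw [show bLoop (fuel + 1) ((pre, t, c :: rs) :: stk) acc
              = bLoop fuel
                  ((PySem.List.pyRange (min c t) (-1) (-1)).foldl
                    (fun st i => (pre ++ [i], t - i, rs) :: st) stk) acc from by
            simp [bLoop, ht]]
          rw [push_desc (min c t) (fun i => (pre ++ [i], t - i, rs)) stk]
          rw [ih _ acc ?hfuel]
          case hfuel =>
            rw [List.map_append, List.sum_append, List.map_map]
            have hc : bCost (c :: rs) t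
                = 1 + ((PySem.List.pyRange 0 (min c t + 1) 1).map (fun i => bCost rs (t - i))).sum := rfl
            have hm : ((PySem.List.pyRange 0 (min c t + 1) 1).map
                ((fun f => bCost f.2.2 f.2.1) ∘ (fun i => (pre ++ [i], t - i, rs)))).sum
                = ((PySem.List.pyRange 0 (min c t + 1) 1).map (fun i => bCost rs (t - i))).sum := rfl
            omega
          rw [List.map_append, List.flatten_append, List.map_map]
          have : ((PySem.List.pyRange 0 (min c t + 1) 1).map
              ((fun f => (gB f.2.2 f.2.1).map (fun v => f.1 ++ v)) ∘ (fun i => (pre ++ [i], t - i, rs)))).flatten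
              = (gB (c :: rs) t).map (fun v => pre ++ v) := by
            rw [show gB (c :: rs) t
                = (PySem.List.pyRange 0 (min c t + 1) 1).flatMap (fun i => (gB rs (t - i)).map (fun v => i :: v)) from by
              simp [gB, ht]]
            rw [List.map_flatMap, ← List.flatMap_def]
            congr 1
            funext i
            simp [Function.comp]
          rw [this]
          simp only [List.map_cons, List.flatten_cons]

-- A's recursion computes exactly gB (on inputs where A does not raise)
theorem A_eq_gB : ∀ (caps : List Int) (tau : Int), (caps = [] → tau = 0) →
    vector_generator caps tau = gB caps tau := by
  intro caps
  induction caps with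
  | nil =>
    intro tau hnil
    rw [hnil rfl]
    rfl
  | cons c cs ih =>
    intro tau _
    by_cases htau : tau = 0
    · subst htau
      rw [gB_zero, vector_generator.eq_def, if_pos rfl]
    · rw [show gB (c :: cs) tau
          = (PySem.List.pyRange 0 (min c tau + 1) 1).flatMap (fun i => (gB cs (tau - i)).map (fun v => i :: v)) from by
        simp [gB, htau]]
      cases cs with
      | nil =>
        rw [vector_generator.eq_def, if_neg htau]
        symm
        apply flatMap_singleton_mem
        intro i hi
        rw [PySem.List.mem_pyRange_one] at hi
        have h0 : (0 : Int) ≤ tau - i := by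
          rcases min_cases c tau with ⟨hm, _⟩ | ⟨hm, _⟩ <;> omega
        rw [show gB [] (tau - i) = [[]] from by simp only [gB]; rw [if_pos h0]]
        rfl
      | cons c2 rest =>
        rw [vector_generator.eq_def, if_neg htau]
        dsimp only
        rw [PySem.List.foldl_append_eq_flatMap, List.nil_append]
        congr 1
        funext i
        rw [ih (tau - i) (fun hh => absurd hh (List.cons_ne_nil _ _))]

-- ===== VERDICT (by name: the statement is the Claim_ definition above) =====
theorem vector_generator_spec : Claim_equal_vector_generator := by
  intro caps tau _ hpre
  unfold Spec_vector_generator vector_generator_alt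
  rw [bLoop_eq (bCost caps tau) [([], tau, caps)] [] (by simp)]
  rw [A_eq_gB caps tau hpre]
  simp
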